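-- pv_equiv track=rewrite | github.com/neha362/LeetCode | Problem_2383_Python.py | minNumberOfHours
-- ===== SOURCE A (Python) =====
-- from typing import List
--
-- def minNumberOfHours(initialEnergy: int, initialExperience: int, energy: List[int], experience: List[int]) -> int:
--     x = max(0, sum(energy) + 1 - initialEnergy)
--     y = experience[0]
--     z = 0
--     for i in experience:
--         y = max(y, i - z)
--         z += i
--     return x + max(0, y - initialExperience + 1)
-- ===== SOURCE B (Python) =====
-- def minNumberOfHours(initialEnergy, initialExperience, energy, experience):
--     hours = max(0, sum(energy) + 1 - initialEnergy)
--     exp = initialExperience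
--     for e in experience:
--         if exp <= e:
--             hours += e + 1 - exp
--             exp = e + 1
--         exp += e
--     return hours
-- ===== Notes on version B (the rewrite author's own statement) =====
-- stated objective: simpler
-- what changed: B simulates the fights directly, keeping a running experience total and adding training hours only when a fight would be lost, instead of A's max-deficit scan (max of experience[i]-prefix_sum) followed by a final max(0, ...) formula; the simulation avoids a max() call per element.
import Mathlib
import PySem

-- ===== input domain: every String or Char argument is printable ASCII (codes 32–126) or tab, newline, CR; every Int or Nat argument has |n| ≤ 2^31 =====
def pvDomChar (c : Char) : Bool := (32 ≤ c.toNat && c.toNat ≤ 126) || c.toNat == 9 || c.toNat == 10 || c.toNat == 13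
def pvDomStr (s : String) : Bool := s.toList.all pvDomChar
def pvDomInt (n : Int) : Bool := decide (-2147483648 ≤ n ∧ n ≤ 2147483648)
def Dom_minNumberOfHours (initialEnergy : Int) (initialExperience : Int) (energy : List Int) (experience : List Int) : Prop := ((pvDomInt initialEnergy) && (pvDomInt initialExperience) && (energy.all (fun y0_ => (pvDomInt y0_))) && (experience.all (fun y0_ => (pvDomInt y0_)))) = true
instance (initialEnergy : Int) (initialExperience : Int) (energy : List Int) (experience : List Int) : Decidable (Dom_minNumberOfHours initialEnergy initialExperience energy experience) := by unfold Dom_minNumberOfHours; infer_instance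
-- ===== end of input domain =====

-- ===== PORT A =====
-- Port of A: max-deficit scan over experience with running prefix sum z.
-- experience[0] is an IndexError on empty experience: Pre_ excludes that; the [] branch value is arbitrary.
def minNumberOfHours (initialEnergy : Int) (initialExperience : Int) (energy : List Int) (experience : List Int) : Int :=
  let x := max 0 (energy.sum + 1 - initialEnergy)
  match experience with
  | [] => 0
  | e0 :: _ =>
    let yz := experience.foldl (fun (p : Int × Int) i => (max p.1 (i - p.2), p.2 + i)) (e0, 0)
    x + max 0 (yz.1 - initialExperience + 1)

-- ===== PORT B =====
-- B: one line for the energy hours, then a direct simulation of the fights,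
-- training (adding e + 1 - exp hours) exactly when the current experience would lose.
def minNumberOfHours_alt (initialEnergy : Int) (initialExperience : Int) (energy : List Int) (experience : List Int) : Int :=
  let hours0 := max 0 (energy.sum + 1 - initialEnergy)
  let st := experience.foldl
    (fun (p : Int × Int) e =>
      let p' := if p.1 ≤ e then (e + 1, p.2 + (e + 1 - p.1)) else p
      (p'.1 + e, p'.2))
    (initialExperience, hours0)
  st.2

-- ===== PRECONDITION & SPEC =====
-- A evaluates experience[0], which raises IndexError on an empty experience list; Pre_ excludes exactly that.
def Pre_minNumberOfHours (initialEnergy : Int) (initialExperience : Int) (energy : List Int) (experience : List Int) : Prop := experience ≠ []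
instance (initialEnergy : Int) (initialExperience : Int) (energy : List Int) (experience : List Int) : Decidable (Pre_minNumberOfHours initialEnergy initialExperience energy experience) := by unfold Pre_minNumberOfHours; infer_instance
def pvWitness_minNumberOfHours : Int × Int × List Int × List Int := (5, 3, [1, 4], [2, 6, 1])

def Spec_minNumberOfHours (initialEnergy : Int) (initialExperience : Int) (energy : List Int) (experience : List Int) (out : Int) : Prop := out = minNumberOfHours_alt initialEnergy initialExperience energy experience
instance (initialEnergy : Int) (initialExperience : Int) (energy : List Int) (experience : List Int) (out : Int) : Decidable (Spec_minNumberOfHours initialEnergy initialExperience energy experience out) := by unfold Spec_minNumberOfHours; infer_instance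

-- ===== CLAIM (what is proved, stated in full; the proofs are below) =====
def Claim_equal_minNumberOfHours : Prop := ∀ (initialEnergy : Int) (initialExperience : Int) (energy : List Int) (experience : List Int), Dom_minNumberOfHours initialEnergy initialExperience energy experience → Pre_minNumberOfHours initialEnergy initialExperience energy experience → Spec_minNumberOfHours initialEnergy initialExperience energy experience (minNumberOfHours initialEnergy initialExperience energy experience)

-- ===== LEMMAS AND PROOFS =====

-- Loop invariant: if B's hours equal a constant offset c plus A's current deficit-hours
-- max 0 (y + 1 - I), and B's experience equals I + (hours - c) + z (z = A's prefix sum),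
-- then that relation between the two folds' final hour counts persists.
lemma loop_equiv (I c : Int) (l : List Int) (y z exp hours : Int)
    (h1 : hours = c + max 0 (y + 1 - I)) (h2 : exp = I + (hours - c) + z) :
    (l.foldl
      (fun (p : Int × Int) e =>
        let p' := if p.1 ≤ e then (e + 1, p.2 + (e + 1 - p.1)) else p
        (p'.1 + e, p'.2))
      (exp, hours)).2
    = c + max 0 ((l.foldl (fun (p : Int × Int) i => (max p.1 (i - p.2), p.2 + i)) (y, z)).1 + 1 - I) := by
  induction l generalizing y z exp hours with
  | nil => simpa using h1
  | cons e t ih =>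
    simp only [List.foldl_cons]
    by_cases hc : exp ≤ e
    · rw [if_pos hc]
      exact ih (max y (e - z)) (z + e) (e + 1 + e) (hours + (e + 1 - exp)) (by omega) (by omega)
    · rw [if_neg hc]
      exact ih (max y (e - z)) (z + e) (exp + e) hours (by omega) (by omega)

-- ===== VERDICT (by name: the statement is the Claim_ definition above) =====
theorem minNumberOfHours_spec : Claim_equal_minNumberOfHours := by
  intro iE iX energy experience _ hpre
  unfold Spec_minNumberOfHours minNumberOfHours minNumberOfHours_alt
  match experience with
  | [] => exact absurd rfl hpre
  | e0 :: t =>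
    simp only [List.foldl_cons]
    by_cases hc : iX ≤ e0
    · rw [if_pos hc]
      rw [loop_equiv iX (max 0 (energy.sum + 1 - iE)) t (max e0 (e0 - 0)) (0 + e0) (e0 + 1 + e0)
        ((max 0 (energy.sum + 1 - iE)) + (e0 + 1 - iX)) (by omega) (by omega)]
      omega
    · rw [if_neg hc]
      rw [loop_equiv iX (max 0 (energy.sum + 1 - iE)) t (max e0 (e0 - 0)) (0 + e0) (iX + e0)
        (max 0 (energy.sum + 1 - iE)) (by omega) (by omega)]
      omega
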